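-- pv_equiv track=rewrite | github.com/PatilHiteshB/Competetive | Python/ReversingTheEquation/ReversingTheEquation.py | reverseEqn
-- ===== SOURCE A (Python) =====
-- def reverseEqn(s):
--     # code here
--     ans = ""
--     ind = len(s)-1
--     while ind >= 0:
--
--         if s[ind] in ['+', "-", "*", "/"]:
--             ans += s[ind]
--             ind -= 1
--             continue
--
--         num = ""
--         while ind >= 0 and ord(s[ind]) >= ord('0') and ord(s[ind]) <= ord('9'):
--             num += s[ind]
--             ind -= 1
--
--         ans += num[-1::-1]
--
--     return ans
-- ===== SOURCE B (Python) =====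
-- def reverseEqn(s):
--     # Tokenize in one forward pass (numbers = maximal digit runs, operators = single
--     # chars), then reverse the token list and join.
--     tokens = []
--     i, n = 0, len(s)
--     while i < n:
--         c = s[i]
--         if c in '+-*/':
--             tokens.append(c)
--             i += 1
--         elif '0' <= c <= '9':
--             j = i
--             while j < n and '0' <= s[j] <= '9':
--                 j += 1
--             tokens.append(s[i:j])
--             i = j
--         else:
--             i += 1
--     return ''.join(reversed(tokens))
-- ===== Notes on version B (the rewrite author's own statement) =====
-- stated objective: idiomatic
-- what changed: B tokenizes the string in a single forward pass into a token list (maximal digit runs and single operators) and returns the reversed token list joined, instead of A's backward index scan that builds the output string piece by piece with a nested digit-collecting loop.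
import Mathlib
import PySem

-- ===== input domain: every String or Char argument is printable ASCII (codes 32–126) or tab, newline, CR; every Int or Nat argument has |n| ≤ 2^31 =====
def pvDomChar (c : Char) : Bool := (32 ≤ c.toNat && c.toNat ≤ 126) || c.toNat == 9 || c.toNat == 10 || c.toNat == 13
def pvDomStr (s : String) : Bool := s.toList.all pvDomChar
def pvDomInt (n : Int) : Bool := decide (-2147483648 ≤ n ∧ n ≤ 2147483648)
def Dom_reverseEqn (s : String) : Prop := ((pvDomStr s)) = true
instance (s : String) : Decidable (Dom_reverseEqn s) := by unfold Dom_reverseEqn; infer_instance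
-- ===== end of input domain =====

-- B tokenizes forward then reverses the token list, instead of A's backward scan; objective: idiomatic.


-- ===== PORT A =====
-- s[ind] in ['+','-','*','/']
def pvIsOp (c : Char) : Bool := c = '+' || c = '-' || c = '*' || c = '/'
-- ord('0') <= ord(c) <= ord('9')
def pvIsDig (c : Char) : Bool := '0'.toNat ≤ c.toNat && c.toNat ≤ '9'.toNat
-- A's outer while over the decreasing index ind, transcribed as a walk over the
-- reversed character list (remaining = s[0..ind] reversed); ans is the characters
-- accumulated so far.  The fuel argument only makes the stuck case total (a character
-- that is neither digit nor operator, where the Python loops forever and which Pre_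
-- excludes); on Pre_ inputs each step consumes a character, so fuel is never exhausted.
def pvLoopA : Nat → List Char → List Char → List Char
  | 0, _, ans => ans
  | _ + 1, [], ans => ans
  | f + 1, c :: rest, ans =>
    if pvIsOp c then
      -- ans += s[ind]; ind -= 1; continue
      pvLoopA f rest (ans ++ [c])
    else
      -- inner while: num += s[ind]; ind -= 1   (num collects a digit run back-to-front)
      let num := (c :: rest).takeWhile pvIsDig
      -- ans += num[-1::-1]
      pvLoopA f ((c :: rest).dropWhile pvIsDig) (ans ++ num.reverse)

def reverseEqn (s : String) : String :=
  String.ofList (pvLoopA (s.toList.length + 1) s.toList.reverse [])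

-- ===== PORT B =====
-- forward tokenizer: maximal digit runs and single operators; any other char is skipped
def pvTokB : List Char → List (List Char)
  | [] => []
  | c :: rest =>
    if pvIsOp c then [c] :: pvTokB rest
    else if pvIsDig c then
      (c :: rest.takeWhile pvIsDig) :: pvTokB (rest.dropWhile pvIsDig)
    else pvTokB rest
termination_by l => l.length
decreasing_by
  all_goals simp
  all_goals exact List.length_dropWhile_le _ _

-- ''.join(reversed(tokens))
def reverseEqn_alt (s : String) : String :=
  String.ofList ((pvTokB s.toList).reverse.flatten)

-- ===== PRECONDITION & SPEC =====
-- Pre_ excludes strings with any character that is neither an ASCII digit nor one of the four arithmetic operator characters: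
-- on those inputs A's outer loop makes no progress and the Python never returns.
def Pre_reverseEqn (s : String) : Prop :=
  (s.toList.all (fun c => pvIsOp c || pvIsDig c)) = true
instance (s : String) : Decidable (Pre_reverseEqn s) := by unfold Pre_reverseEqn; infer_instance

def pvWitness_reverseEqn : String := "1+2"

def Spec_reverseEqn (s : String) (out : String) : Prop := out = reverseEqn_alt s
instance (s : String) (out : String) : Decidable (Spec_reverseEqn s out) := by unfold Spec_reverseEqn; infer_instance

-- ===== CLAIM (what is proved, stated in full; the proofs are below) =====
def Claim_equal_reverseEqn : Prop := ∀ (s : String), Dom_reverseEqn s → Pre_reverseEqn s → Spec_reverseEqn s (reverseEqn s)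

-- ===== LEMMAS AND PROOFS =====

-- an operator character is not a digit
theorem pvOp_not_dig {c : Char} (h : pvIsOp c = true) : pvIsDig c = false := by
  simp [pvIsOp] at h
  rcases h with ((h | h) | h) | h <;> subst h <;> decide

-- a valid non-operator character is a digit
theorem pvValid_dig {c : Char} (hv : pvIsOp c = true ∨ pvIsDig c = true)
    (h : pvIsOp c = false) : pvIsDig c = true := by
  rcases hv with hv | hv
  · rw [hv] at h; cases h
  · exact hv

-- the head of a dropWhile result fails the predicate
theorem pvDropWhile_head_false {p : Char → Bool} :
    ∀ {l : List Char} {y : Char} {t : List Char}, l.dropWhile p = y :: t → p y = false := by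
  intro l
  induction l with
  | nil => intro y t h; simp [List.dropWhile] at h
  | cons a l ih =>
    intro y t h
    rw [List.dropWhile_cons] at h
    split at h
    · exact ih h
    · cases h; simpa using ‹¬ p a = true›

-- a nonempty suffix has the same last element
theorem pvGetLast?_suffix {l₂ l : List Char} (h : l₂ <:+ l) (hne : l₂ ≠ []) :
    l.getLast? = l₂.getLast? := by
  obtain ⟨u, rfl⟩ := h
  cases l₂ with
  | nil => exact absurd rfl hne
  | cons b t =>
    rw [List.getLast?_append]
    obtain ⟨v, hv⟩ := Option.isSome_iff_exists.mp (List.getLast?_isSome.mpr hne)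
    simp [hv]

-- a nonempty all-digit list is a single token
theorem pvTokB_all_dig {l : List Char} (hne : l ≠ []) (hd : ∀ c ∈ l, pvIsDig c = true) :
    pvTokB l = [l] := by
  cases l with
  | nil => exact absurd rfl hne
  | cons c rest =>
    have hc : pvIsDig c = true := hd c (by simp)
    have hop : pvIsOp c = false := by
      cases hcop : pvIsOp c
      · rfl
      · have := pvOp_not_dig hcop; rw [hc] at this; cases this
    have ht : rest.takeWhile pvIsDig = rest :=
      List.takeWhile_eq_self_iff.mpr (fun x hx => hd x (by simp [hx]))
    have hdn : rest.dropWhile pvIsDig = [] :=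
      List.dropWhile_eq_nil_iff.mpr (fun x hx => hd x (by simp [hx]))
    rw [pvTokB]
    simp [hop, hc, ht, hdn, pvTokB]

-- appending an operator char adds one final single-char token
theorem pvTokB_append_op {c : Char} (hc : pvIsOp c = true) :
    ∀ {l : List Char}, (∀ x ∈ l, pvIsOp x = true ∨ pvIsDig x = true) →
      pvTokB (l ++ [c]) = pvTokB l ++ [[c]] := by
  intro l
  induction l using pvTokB.induct with
  | case1 =>
    intro _
    rw [pvTokB]
    simp [hc, pvTokB]
  | case2 x rest hx ih =>
    intro hvalid
    rw [List.cons_append, pvTokB, pvTokB]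
    simp only [hx, if_pos]
    rw [ih (fun y hy => hvalid y (by simp [hy]))]
    simp
  | case3 x rest hx hdx ih =>
    intro hvalid
    by_cases hall : ∀ y ∈ rest, pvIsDig y = true
    · have ht : rest.takeWhile pvIsDig = rest := List.takeWhile_eq_self_iff.mpr hall
      have hdn : rest.dropWhile pvIsDig = [] := List.dropWhile_eq_nil_iff.mpr hall
      rw [List.cons_append, pvTokB, pvTokB]
      simp [hx, hdx, List.takeWhile_append, List.dropWhile_append, ht, hdn,
        pvOp_not_dig hc, hc, pvTokB]
    · have hlen : (rest.takeWhile pvIsDig).length ≠ rest.length := by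
        intro h
        exact hall (fun y hy => List.mem_takeWhile_imp
          ((List.Sublist.eq_of_length (List.takeWhile_sublist _) h) ▸ hy))
      have hdne : rest.dropWhile pvIsDig ≠ [] :=
        fun h => hall (List.dropWhile_eq_nil_iff.mp h)
      rw [List.cons_append, pvTokB, pvTokB]
      simp only [hx, hdx, if_pos, if_neg, Bool.false_eq_true, not_false_iff]
      rw [List.takeWhile_append, List.dropWhile_append]
      simp only [hlen, List.isEmpty_iff, hdne, if_false]
      rw [ih (fun y hy => hvalid y (by
        simp only [List.mem_cons]
        exact Or.inr ((List.dropWhile_sublist (l := rest) (p := pvIsDig)).mem hy)))]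
      simp
  | case4 x rest hx hdx ih =>
    intro hvalid
    rcases hvalid x (by simp) with h | h
    · exact absurd h hx
    · exact absurd h hdx

-- appending a digit run to a list ending in an operator (or empty) adds one final token
theorem pvTokB_append_digits {ds : List Char} (hne : ds ≠ []) (hds : ∀ c ∈ ds, pvIsDig c = true) :
    ∀ {l : List Char}, (∀ x ∈ l, pvIsOp x = true ∨ pvIsDig x = true) →
      (∀ c, l.getLast? = some c → pvIsOp c = true) →
      pvTokB (l ++ ds) = pvTokB l ++ [ds] := by
  intro l
  induction l using pvTokB.induct with
  | case1 =>
    intro _ _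
    rw [List.nil_append, pvTokB_all_dig hne hds]
    simp [pvTokB]
  | case2 x rest hx ih =>
    intro hvalid hend
    rw [List.cons_append, pvTokB, pvTokB]
    simp only [hx, if_pos]
    rw [ih (fun y hy => hvalid y (by simp [hy])) (fun c hcl => by
      apply hend
      cases rest with
      | nil => cases hcl
      | cons b t => rw [List.getLast?_cons_cons]; exact hcl)]
    simp
  | case3 x rest hx hdx ih =>
    intro hvalid hend
    -- the list ends in an operator, so rest contains a non-digit character
    have hrest_ne : rest ≠ [] := by
      intro h
      subst h
      have := hend x (by simp)
      have := pvOp_not_dig this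
      rw [hdx] at this; cases this
    have hall : ¬ ∀ y ∈ rest, pvIsDig y = true := by
      intro hall
      have hcl : rest.getLast? = some (rest.getLast hrest_ne) := List.getLast?_eq_some_getLast hrest_ne
      have hcop : pvIsOp (rest.getLast hrest_ne) = true := by
        apply hend
        cases rest with
        | nil => exact absurd rfl hrest_ne
        | cons b t => rw [List.getLast?_cons_cons]; exact hcl
      have hcd : pvIsDig (rest.getLast hrest_ne) = true := hall _ (List.getLast_mem hrest_ne)
      rw [pvOp_not_dig hcop] at hcd; cases hcd
    have hlen : (rest.takeWhile pvIsDig).length ≠ rest.length := by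
      intro h
      exact hall (fun y hy => List.mem_takeWhile_imp
        ((List.Sublist.eq_of_length (List.takeWhile_sublist _) h) ▸ hy))
    have hdne : rest.dropWhile pvIsDig ≠ [] :=
      fun h => hall (List.dropWhile_eq_nil_iff.mp h)
    rw [List.cons_append, pvTokB, pvTokB]
    simp only [hx, hdx, if_pos, if_neg, Bool.false_eq_true, not_false_iff]
    rw [List.takeWhile_append, List.dropWhile_append]
    simp only [hlen, List.isEmpty_iff, hdne, if_false]
    rw [ih (fun y hy => hvalid y (by
        simp only [List.mem_cons]
        exact Or.inr ((List.dropWhile_sublist (l := rest) (p := pvIsDig)).mem hy)))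
      (fun c hcl => by
        apply hend
        have h2 : rest.getLast? = some c := by
          rw [pvGetLast?_suffix (List.dropWhile_suffix (l := rest) (p := pvIsDig)) hdne]
          exact hcl
        cases rest with
        | nil => exact absurd rfl hrest_ne
        | cons b t => rw [List.getLast?_cons_cons]; exact h2)]
    simp
  | case4 x rest hx hdx ih =>
    intro hvalid hend
    rcases hvalid x (by simp) with h | h
    · exact absurd h hx
    · exact absurd h hdx

-- main loop invariant: A's backward loop appends to ans the flattening of B's reversed tokens
theorem pvLoopA_eq :
    ∀ (fuel : Nat) (r ans : List Char),
      (∀ c ∈ r, pvIsOp c = true ∨ pvIsDig c = true) → r.length ≤ fuel →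
      pvLoopA fuel r ans = ans ++ (pvTokB r.reverse).reverse.flatten := by
  intro fuel
  induction fuel with
  | zero =>
    intro r ans hvalid hf
    have : r = [] := List.length_eq_zero_iff.mp (Nat.le_zero.mp hf)
    subst this
    simp [pvLoopA, pvTokB]
  | succ f ih =>
    intro r ans hvalid hf
    cases r with
    | nil => simp [pvLoopA, pvTokB]
    | cons c rest =>
      rw [pvLoopA]
      cases hop : pvIsOp c with
      | true =>
        simp only [if_pos]
        rw [ih rest (ans ++ [c]) (fun y hy => hvalid y (by simp [hy])) (by simpa using Nat.lt_succ_iff.mp (by simpa using hf))]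
        rw [List.reverse_cons, pvTokB_append_op hop (fun y hy => hvalid y (by simp at hy ⊢; exact Or.inr hy))]
        simp
      | false =>
        simp only [Bool.false_eq_true, if_neg, not_false_iff]
        have hdc : pvIsDig c = true := pvValid_dig (hvalid c (by simp)) hop
        have htk : (c :: rest).takeWhile pvIsDig = c :: rest.takeWhile pvIsDig := by
          rw [List.takeWhile_cons, if_pos hdc]
        have hdr : (c :: rest).dropWhile pvIsDig = rest.dropWhile pvIsDig := by
          rw [List.dropWhile_cons, if_pos hdc]
        rw [ih ((c :: rest).dropWhile pvIsDig) _
          (fun y hy => hvalid y ((List.dropWhile_sublist (l := c :: rest) (p := pvIsDig)).mem hy))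
          (by
            rw [hdr]
            exact Nat.le_trans (List.length_dropWhile_le _ _) (Nat.lt_succ_iff.mp (by simpa using hf)))]
        have hsplit : (c :: rest).reverse
            = ((c :: rest).dropWhile pvIsDig).reverse ++ ((c :: rest).takeWhile pvIsDig).reverse := by
          rw [← List.reverse_append, List.takeWhile_append_dropWhile]
        rw [hsplit, pvTokB_append_digits
          (by rw [htk]; simp)
          (fun y hy => by
            rw [List.mem_reverse] at hy
            exact List.mem_takeWhile_imp hy)
          (fun y hy => by
            rw [List.mem_reverse] at hy
            exact hvalid y ((List.dropWhile_sublist (l := c :: rest) (p := pvIsDig)).mem hy))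
          (fun k hk => by
            rw [List.getLast?_reverse] at hk
            cases hdw : (c :: rest).dropWhile pvIsDig with
            | nil => rw [hdw] at hk; cases hk
            | cons y t =>
              rw [hdw] at hk
              simp only [List.head?_cons, Option.some_inj] at hk
              subst hk
              have hyv := hvalid y ((List.dropWhile_sublist (l := c :: rest) (p := pvIsDig)).mem (hdw ▸ (by simp : y ∈ y :: t)))
              have hyd := pvDropWhile_head_false hdw
              rcases hyv with h | h
              · exact h
              · rw [hyd] at h; cases h)]
        simp

-- ===== VERDICT (by name: the statement is the Claim_ definition above) =====
theorem reverseEqn_spec : Claim_equal_reverseEqn := by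
  intro s _ hpre
  have hpre' : ∀ c ∈ s.toList, pvIsOp c = true ∨ pvIsDig c = true := by
    intro c hc
    simpa using List.all_eq_true.mp hpre c hc
  unfold Spec_reverseEqn reverseEqn reverseEqn_alt
  rw [pvLoopA_eq _ _ _ (fun c hc => hpre' c (by simpa using hc)) (by simp)]
  simp
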